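-- pv_equiv track=rewrite | github.com/zzw922cn/Automatic_Speech_Recognition | src/trash/ed.py | group_phoneme
-- ===== SOURCE A (Python) =====
-- def group_phoneme(orig_phn,mapping):
--     group_phn = []
--     for val in orig_phn:
--         group_phn.append(val)
--     group_phn.append('sil')
--     for key in mapping.keys():
--         if key in orig_phn:
--             group_phn.remove(key)
--     group_phn.sort()
--     return group_phn
-- ===== SOURCE B (Python) =====
-- def group_phoneme(orig_phn, mapping):
--     pending = {k for k in mapping if k in orig_phn}
--     result = []
--     for v in orig_phn:
--         if v in pending:
--             pending.discard(v)
--         else: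
--             result.append(v)
--     result.append('sil')
--     return sorted(result)
-- ===== Notes on version B (the rewrite author's own statement) =====
-- stated objective: simpler
-- what changed: Instead of copying the list and calling list.remove (a linear scan) once per mapping key, B builds the set of present keys once and makes a single pass over orig_phn, skipping the first occurrence of each pending key, then appends 'sil' and sorts.
import Mathlib
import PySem

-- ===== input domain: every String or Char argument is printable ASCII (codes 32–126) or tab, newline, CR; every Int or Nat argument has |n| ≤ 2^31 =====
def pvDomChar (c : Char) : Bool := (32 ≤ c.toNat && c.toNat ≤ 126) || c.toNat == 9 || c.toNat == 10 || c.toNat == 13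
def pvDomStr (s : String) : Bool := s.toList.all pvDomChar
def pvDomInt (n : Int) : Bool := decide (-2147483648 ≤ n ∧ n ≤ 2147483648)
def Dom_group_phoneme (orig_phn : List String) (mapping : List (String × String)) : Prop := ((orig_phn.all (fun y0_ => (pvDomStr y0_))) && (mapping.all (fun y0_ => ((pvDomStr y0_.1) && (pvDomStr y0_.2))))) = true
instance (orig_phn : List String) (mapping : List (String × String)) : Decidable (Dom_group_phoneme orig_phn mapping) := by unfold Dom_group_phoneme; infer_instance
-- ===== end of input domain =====

-- B replaces A's copy + repeated list.remove scans with one pass over orig_phn skipping the first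
-- occurrence of each present mapping key (objective: simpler single-pass decomposition).


-- ===== PORT A =====
-- mapping.keys() on the association list is its key column in insertion order: mapping.map Prod.fst.
-- Under Pre_ (unique keys, the dict invariant) remove? never returns none when the guard holds,
-- so the .getD default is unreachable there.
def group_phoneme (orig_phn : List String) (mapping : List (String × String)) : List String :=
  let group_phn := orig_phn.foldl (fun acc val => acc ++ [val]) []
  let group_phn := group_phn ++ ["sil"]
  let group_phn := (mapping.map Prod.fst).foldl
    (fun g key => if key ∈ orig_phn then (PySem.List.remove? g key).getD g else g) group_phn
  PySem.List.sorted group_phn (fun x => x) false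

-- ===== PORT B =====
def group_phoneme_alt (orig_phn : List String) (mapping : List (String × String)) : List String :=
  let pending : PySem.Set String :=
    PySem.Set.ofList ((mapping.map Prod.fst).filter (fun k => decide (k ∈ orig_phn)))
  let st := orig_phn.foldl
    (fun (st : PySem.Set String × List String) v =>
      if v ∈ st.1 then (PySem.Set.discard st.1 v, st.2) else (st.1, st.2 ++ [v]))
    (pending, [])
  PySem.List.sorted (st.2 ++ ["sil"]) (fun x => x) false

-- ===== PRECONDITION & SPEC =====
-- mapping is a Python dict, whose keys are necessarily distinct; Pre_ states that representation
-- invariant of the association list (no Python input is excluded).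
def Pre_group_phoneme (orig_phn : List String) (mapping : List (String × String)) : Prop :=
  (mapping.map Prod.fst).Nodup
instance (orig_phn : List String) (mapping : List (String × String)) : Decidable (Pre_group_phoneme orig_phn mapping) := by unfold Pre_group_phoneme; infer_instance

def pvWitness_group_phoneme : List String × (List (String × String)) :=
  (["aa", "sil", "b", "aa"], [("b", "x"), ("zz", "y")])

def Spec_group_phoneme (orig_phn : List String) (mapping : List (String × String)) (out : List String) : Prop := out = group_phoneme_alt orig_phn mapping
instance (orig_phn : List String) (mapping : List (String × String)) (out : List String) : Decidable (Spec_group_phoneme orig_phn mapping out) := by unfold Spec_group_phoneme; infer_instance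

-- ===== CLAIM (what is proved, stated in full; the proofs are below) =====
def Claim_equal_group_phoneme : Prop := ∀ (orig_phn : List String) (mapping : List (String × String)), Dom_group_phoneme orig_phn mapping → Pre_group_phoneme orig_phn mapping → Spec_group_phoneme orig_phn mapping (group_phoneme orig_phn mapping)

-- ===== LEMMAS AND PROOFS =====

-- erase each element of p (in order) from l
def erAll (p l : List String) : List String := p.foldl (fun g k => g.erase k) l

theorem removeD_eq_erase (g : List String) (k : String) :
    (PySem.List.remove? g k).getD g = g.erase k := by
  by_cases h : k ∈ g
  · rw [PySem.List.remove?_eq_some_erase g k h]; rfl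
  · rw [(PySem.List.remove?_eq_none_iff g k).mpr h, List.erase_of_not_mem h]; rfl

theorem erAll_perm {p q : List String} (h : p.Perm q) (l : List String) :
    erAll p l = erAll q l :=
  List.Perm.foldl_eq (rcomm := ⟨fun _ a b => List.erase_comm a b⟩) h l

theorem erAll_nil (p : List String) : erAll p [] = [] := by
  induction p with
  | nil => rfl
  | cons k t ih => simpa [erAll] using ih

theorem erAll_cons_not_mem (p : List String) (v : String) (hv : v ∉ p) (l : List String) :
    erAll p (v :: l) = v :: erAll p l := by
  induction p generalizing l with
  | nil => rfl
  | cons k t ih =>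
    have hkv : ¬((v == k) = true) := by
      simp only [beq_iff_eq]
      rintro rfl; exact hv List.mem_cons_self
    simp only [erAll, List.foldl_cons, List.erase_cons_tail hkv]
    exact ih (fun h => hv (List.mem_cons_of_mem _ h)) (l.erase k)

theorem erAll_cons_mem (p : List String) (v : String) (hv : v ∈ p) (l : List String) :
    erAll p (v :: l) = erAll (p.erase v) l := by
  rw [erAll_perm (List.perm_cons_erase hv)]
  simp [erAll]

-- B's single pass computes r ++ erAll p l
theorem loop_eq (l : List String) : ∀ (p r : List String), p.Nodup →
    (l.foldl (fun (st : PySem.Set String × List String) v =>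
        if v ∈ st.1 then (PySem.Set.discard st.1 v, st.2) else (st.1, st.2 ++ [v]))
      (p, r)).2 = r ++ erAll p l := by
  induction l with
  | nil => intro p r _; simp [erAll_nil]
  | cons v l ih =>
    intro p r hp
    by_cases hv : v ∈ p
    · have hperm : (PySem.Set.discard p v).Perm (p.erase v) := by
        rw [List.perm_ext_iff_of_nodup (PySem.Set.nodup_discard p v hp) (hp.erase v)]
        intro a
        rw [PySem.Set.mem_discard, hp.mem_erase_iff]
        tauto
      simp only [List.foldl_cons, if_pos hv]
      rw [ih (PySem.Set.discard p v) r (PySem.Set.nodup_discard p v hp),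
        erAll_perm hperm, erAll_cons_mem p v hv]
    · simp only [List.foldl_cons, if_neg hv]
      rw [ih p (r ++ [v]) hp, erAll_cons_not_mem p v hv, List.append_assoc]
      rfl

-- A's guarded remove loop is erAll over the present keys
theorem foldA_eq (orig : List String) (ks : List String) : ∀ g : List String,
    ks.foldl (fun g key => if key ∈ orig then g.erase key else g) g
      = erAll (ks.filter (fun k => decide (k ∈ orig))) g := by
  induction ks with
  | nil => intro g; rfl
  | cons k t ih =>
    intro g
    by_cases hk : k ∈ orig
    · rw [List.foldl_cons, if_pos hk, List.filter_cons_of_pos (by simpa using hk)]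
      exact ih (g.erase k)
    · rw [List.foldl_cons, if_neg hk, List.filter_cons_of_neg (by simpa using hk)]
      exact ih g

-- erasing elements of orig commutes with the trailing ++ ["sil"]
theorem erAll_append_sil (ks : List String) : ∀ orig : List String, ks.Nodup →
    (∀ k ∈ ks, k ∈ orig) → erAll ks (orig ++ ["sil"]) = erAll ks orig ++ ["sil"] := by
  induction ks with
  | nil => intro orig _ _; rfl
  | cons k t ih =>
    intro orig hnd hsub
    have hk : k ∈ orig := hsub k List.mem_cons_self
    have hknt : k ∉ t := (List.nodup_cons.mp hnd).1
    simp only [erAll, List.foldl_cons, List.erase_append_left _ hk]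
    exact ih (orig.erase k) (List.nodup_cons.mp hnd).2
      (fun k' hk' => (List.mem_erase_of_ne (show k' ≠ k by rintro rfl; exact hknt hk')).mpr
        (hsub k' (List.mem_cons_of_mem _ hk')))

-- ===== VERDICT (by name: the statement is the Claim_ definition above) =====
theorem group_phoneme_spec : Claim_equal_group_phoneme := by
  intro orig mapping _ hpre
  unfold Spec_group_phoneme group_phoneme group_phoneme_alt
  show PySem.List.sorted
      ((mapping.map Prod.fst).foldl
        (fun g key => if key ∈ orig then (PySem.List.remove? g key).getD g else g)
        ((orig.foldl (fun acc val => acc ++ [val]) []) ++ ["sil"]))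
      (fun x => x) false
    = PySem.List.sorted
      (((orig.foldl
          (fun (st : PySem.Set String × List String) v =>
            if v ∈ st.1 then (PySem.Set.discard st.1 v, st.2) else (st.1, st.2 ++ [v]))
          (PySem.Set.ofList ((mapping.map Prod.fst).filter (fun k => decide (k ∈ orig))), [])).2)
        ++ ["sil"])
      (fun x => x) false
  have hfirst : orig.foldl (fun acc val => acc ++ [val]) [] = orig := by
    simpa using PySem.List.foldl_append_singleton orig ([] : List String)
  simp only [removeD_eq_erase]
  set ks := (mapping.map Prod.fst).filter (fun k => decide (k ∈ orig)) with hks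
  have hksnd : ks.Nodup := hpre.filter _
  have hsub : ∀ k ∈ ks, k ∈ orig := by
    intro k hk
    have := List.of_mem_filter hk
    simpa using this
  rw [hfirst, foldA_eq, PySem.Set.ofList_eq_self_of_nodup _ hksnd,
    loop_eq orig ks [] hksnd, List.nil_append, ← hks,
    erAll_append_sil ks orig hksnd hsub]
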